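-- pv_equiv track=rewrite | github.com/nobe0716/problem_solving | codeforces/contests/1519/D. Maximum Sum of Products.py | solve
-- ===== SOURCE A (Python) =====
-- def solve(n, a, b):
--     prefix_sum = [0] * (n + 1)
--     for i in range(n):
--         prefix_sum[i + 1] = prefix_sum[i] + a[i] * b[i]
--
--     max_sum = prefix_sum[-1]
--     for i in range(n):
--         mid_sum = a[i] * b[i]
--         l, r = i - 1, i + 1
--         while 0 <= l and r < n:
--             mid_sum += a[l] * b[r] + a[r] * b[l]
--             max_sum = max(max_sum, prefix_sum[l] + mid_sum + prefix_sum[-1] - prefix_sum[r + 1])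
--             l -= 1
--             r += 1
--
--         mid_sum = 0
--         l, r = i, i + 1
--         while 0 <= l and r < n:
--             mid_sum += a[l] * b[r] + a[r] * b[l]
--             max_sum = max(max_sum, prefix_sum[l] + mid_sum + prefix_sum[-1] - prefix_sum[r + 1])
--             l -= 1
--             r += 1
--     return max_sum
-- ===== SOURCE B (Python) =====
-- def solve(n, a, b):
--     prefix = [0]
--     for i in range(n):
--         prefix.append(prefix[-1] + a[i] * b[i])
--     total = prefix[n]
--     best = total
--
--     # interval DP by increasing segment length, two rolling rows:
--     # pp[l] = reversed-dot of segment of length (len-2) starting at l,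
--     # p[l]  = same for length (len-1); cur[l] for length len.
--     pp = [0] * (n + 1)                       # length-0 segments
--     p = [a[l] * b[l] for l in range(n)]      # length-1 segments
--     for l in range(n):
--         best = max(best, prefix[l] + p[l] + total - prefix[l + 1])
--     for length in range(2, n + 1):
--         cur = [pp[l + 1] + a[l] * b[l + length - 1] + a[l + length - 1] * b[l]
--                for l in range(n - length + 1)]
--         for l in range(n - length + 1):
--             r = l + length - 1
--             best = max(best, prefix[l] + cur[l] + total - prefix[r + 1])
--         pp, p = p, cur
--     return best
-- ===== Notes on version B (the rewrite author's own statement) =====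
-- stated objective: alternative
-- what changed: A expands around every center with two-pointer while loops; B computes the reversed-segment dot products by a bottom-up interval DP over segment lengths (rev[l][r] = rev[l+1][r-1] + a[l]*b[r] + a[r]*b[l]) kept in two rolling 1-D rows, seeding the answer with the unreversed total.
import Mathlib
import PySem

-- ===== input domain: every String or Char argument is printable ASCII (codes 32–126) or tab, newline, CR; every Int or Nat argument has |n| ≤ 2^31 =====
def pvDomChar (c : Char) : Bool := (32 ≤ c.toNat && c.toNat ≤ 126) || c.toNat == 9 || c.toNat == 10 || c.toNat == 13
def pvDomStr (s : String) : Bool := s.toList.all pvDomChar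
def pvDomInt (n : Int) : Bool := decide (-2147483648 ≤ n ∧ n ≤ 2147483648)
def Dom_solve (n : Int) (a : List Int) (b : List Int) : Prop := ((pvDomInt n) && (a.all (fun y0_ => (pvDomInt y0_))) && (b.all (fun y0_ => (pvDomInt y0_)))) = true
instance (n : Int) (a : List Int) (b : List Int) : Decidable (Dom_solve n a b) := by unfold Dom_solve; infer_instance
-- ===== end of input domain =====

-- B replaces A's expand-around-every-center two-pointer scan by a bottom-up interval DP over
-- segment lengths with two rolling rows; same O(n^2) cost, a genuinely different traversal.

-- shared total indexing helper: Python's xs[i] (in range under Pre_solve)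
def pvG (xs : List Int) (i : Int) : Int := PySem.List.pyGetD xs i 0

-- ===== PORT A =====
-- the 'while 0 <= l and r < n' expansion loop of A
def solveWhileA (a b ps : List Int) (n l r mid best : Int) : Int :=
  if h : 0 ≤ l ∧ r < n then
    let mid' := mid + pvG a l * pvG b r + pvG a r * pvG b l
    let best' := max best (pvG ps l + mid' + pvG ps (-1) - pvG ps (r + 1))
    solveWhileA a b ps n (l - 1) (r + 1) mid' best'
  else best
termination_by (n - r).toNat
decreasing_by omega

-- one iteration of A's outer 'for i in range(n)': the two while loops
def solveIterA (a b ps : List Int) (n best i : Int) : Int :=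
  solveWhileA a b ps n i (i + 1) 0
    (solveWhileA a b ps n (i - 1) (i + 1) (pvG a i * pvG b i) best)

def solve (n : Int) (a : List Int) (b : List Int) : Int :=
  let ps := (PySem.List.pyRange 0 n 1).foldl
    (fun ps i => PySem.List.pySetD ps (i + 1) (pvG ps i + pvG a i * pvG b i))
    (List.replicate (n + 1).toNat 0)
  (PySem.List.pyRange 0 n 1).foldl (solveIterA a b ps n) (pvG ps (-1))

-- ===== PORT B =====
-- one iteration of B's 'for length in range(2, n+1)': build row 'cur' from 'pp', scan it, shift rows
def solveStepB (a b ps : List Int) (n total : Int)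
    (st : List Int × List Int × Int) (len : Int) : List Int × List Int × Int :=
  let cur := (PySem.List.pyRange 0 (n - len + 1) 1).map
    (fun l => pvG st.1 (l + 1) + pvG a l * pvG b (l + len - 1) + pvG a (l + len - 1) * pvG b l)
  let best := (PySem.List.pyRange 0 (n - len + 1) 1).foldl
    (fun best l => max best (pvG ps l + pvG cur l + total - pvG ps (l + len - 1 + 1))) st.2.2
  (st.2.1, cur, best)

def solve_alt (n : Int) (a : List Int) (b : List Int) : Int :=
  let ps := (PySem.List.pyRange 0 n 1).foldl
    (fun ps i => ps ++ [pvG ps (-1) + pvG a i * pvG b i]) [0]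
  let total := pvG ps n
  let pp := List.replicate (n + 1).toNat (0 : Int)
  let p := (PySem.List.pyRange 0 n 1).map (fun l => pvG a l * pvG b l)
  let best1 := (PySem.List.pyRange 0 n 1).foldl
    (fun best l => max best (pvG ps l + pvG p l + total - pvG ps (l + 1))) total
  let fin := (PySem.List.pyRange 2 (n + 1) 1).foldl (solveStepB a b ps n total) (pp, p, best1)
  fin.2.2

-- ===== PRECONDITION & SPEC =====
-- Pre_solve: exactly where Python A returns normally (n < 0 or n > len(a)/len(b) raises IndexError)
def Pre_solve (n : Int) (a : List Int) (b : List Int) : Prop :=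
  0 ≤ n ∧ n ≤ (a.length : Int) ∧ n ≤ (b.length : Int)
instance (n : Int) (a : List Int) (b : List Int) : Decidable (Pre_solve n a b) := by
  unfold Pre_solve; infer_instance

def pvWitness_solve : Int × List Int × List Int := (2, [1, 2], [3, 4])

def Spec_solve (n : Int) (a : List Int) (b : List Int) (out : Int) : Prop := out = solve_alt n a b
instance (n : Int) (a : List Int) (b : List Int) (out : Int) : Decidable (Spec_solve n a b out) := by
  unfold Spec_solve; infer_instance

-- ===== CLAIM (what is proved, stated in full; the proofs are below) =====
def Claim_equal_solve : Prop := ∀ (n : Int) (a : List Int) (b : List Int),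
  Dom_solve n a b → Pre_solve n a b → Spec_solve n a b (solve n a b)

-- ===== LEMMAS AND PROOFS =====

-- canonical quantities: prefix sums, reversed-segment dot product, candidate value
def pvP (a b : List Int) (k : Int) : Int :=
  ((PySem.List.pyRange 0 k 1).map (fun j => pvG a j * pvG b j)).sum
def pvRev (a b : List Int) (l r : Int) : Int :=
  ((PySem.List.pyRange l (r + 1) 1).map (fun j => pvG a j * pvG b (l + r - j))).sum
def pvF (a b : List Int) (n l r : Int) : Int :=
  pvP a b l + pvRev a b l r + pvP a b n - pvP a b (r + 1)
def psL (a b : List Int) (n : Int) : List Int := (PySem.List.pyRange 0 (n + 1) 1).map (pvP a b)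
def rowL (a b : List Int) (n L : Int) : List Int :=
  (PySem.List.pyRange 0 (n - L + 1) 1).map (fun l => pvRev a b l (l + L - 1))

lemma pvP_succ (a b : List Int) (k : Int) (hk : 0 ≤ k) :
    pvP a b (k + 1) = pvP a b k + pvG a k * pvG b k := by
  unfold pvP
  rw [PySem.List.pyRange_one_succ_right hk]
  simp

lemma pvRev_empty (a b : List Int) (l r : Int) (h : r + 1 ≤ l) : pvRev a b l r = 0 := by
  unfold pvRev
  rw [PySem.List.pyRange_one_eq_nil h]
  simp

lemma pvRev_single (a b : List Int) (l : Int) : pvRev a b l l = pvG a l * pvG b l := by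
  unfold pvRev
  rw [PySem.List.pyRange_one_singleton]
  simp

lemma pvRev_step (a b : List Int) (l r : Int) (h : l < r) :
    pvRev a b l r = pvRev a b (l + 1) (r - 1) + pvG a l * pvG b r + pvG a r * pvG b l := by
  unfold pvRev
  rw [PySem.List.pyRange_one_cons (by omega : l < r + 1),
      show r + 1 = (r - 1) + 1 + 1 by ring,
      PySem.List.pyRange_one_succ_right (by omega : l + 1 ≤ r - 1 + 1)]
  have hmid : ∀ j, j ∈ PySem.List.pyRange (l + 1) (r - 1 + 1) 1 →
      pvG a j * pvG b (l + r - j) = pvG a j * pvG b (l + 1 + (r - 1) - j) := by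
    intro j _
    have h : l + r - j = l + 1 + (r - 1) - j := by ring
    rw [h]
  rw [List.map_cons, List.map_append, List.sum_cons, List.sum_append,
      List.map_congr_left hmid]
  simp only [List.map_cons, List.map_nil, List.sum_cons, List.sum_nil]
  have h1 : l + r - l = r := by ring
  have h2 : l + r - (r - 1 + 1) = l := by ring
  rw [h1, h2, show r - 1 + 1 = r by ring]
  ring

lemma psL_get (a b : List Int) (n k : Int) (h0 : 0 ≤ k) (h1 : k ≤ n) :
    pvG (psL a b n) k = pvP a b k := by
  unfold psL pvG
  exact PySem.List.pyGetD_map_pyRange_of_nonneg _ _ _ _ h0 (by omega)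

lemma psL_last (a b : List Int) (n : Int) (hn : 0 ≤ n) :
    pvG (psL a b n) (-1) = pvP a b n := by
  unfold psL pvG
  rw [PySem.List.pyRange_one_succ_right hn, List.map_append]
  exact PySem.List.pyGetD_neg_one_append_singleton _ _ _

lemma pvG_append_left (xs ys : List Int) (i : Int) (h0 : 0 ≤ i) (h1 : i < (xs.length : Int)) :
    pvG (xs ++ ys) i = pvG xs i := by
  obtain ⟨k, rfl⟩ : ∃ k : Nat, i = (k : Int) := ⟨i.toNat, by omega⟩
  unfold pvG
  rw [PySem.List.pyGetD_natCast, PySem.List.pyGetD_natCast]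
  exact List.getD_append _ _ _ _ (by exact_mod_cast h1)

lemma pv_set_append {α : Type} (xs ys : List α) (y v : α) :
    (xs ++ y :: ys).set xs.length v = xs ++ v :: ys := by
  induction xs with
  | nil => rfl
  | cons x t ih => simp [ih]

-- the two prefix-sum builds both produce psL
lemma psA_eq (a b : List Int) (n : Int) (hn : 0 ≤ n) :
    (PySem.List.pyRange 0 n 1).foldl
      (fun ps i => PySem.List.pySetD ps (i + 1) (pvG ps i + pvG a i * pvG b i))
      (List.replicate (n + 1).toNat 0) = psL a b n := by
  unfold psL
  have key : ∀ m : Int, 0 ≤ m → m ≤ n →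
      (PySem.List.pyRange 0 m 1).foldl
        (fun ps i => PySem.List.pySetD ps (i + 1) (pvG ps i + pvG a i * pvG b i))
        (List.replicate (n + 1).toNat 0)
      = (PySem.List.pyRange 0 (m + 1) 1).map (pvP a b)
          ++ List.replicate (n - m).toNat 0 := by
    intro m hm
    induction m, hm using Int.le_induction with
    | base =>
      intro _
      rw [PySem.List.pyRange_one_eq_nil (le_refl 0), PySem.List.pyRange_one_singleton]
      have h1 : (n + 1).toNat = (n - 0).toNat + 1 := by omega
      rw [h1, List.replicate_succ]
      simp [pvP, PySem.List.pyRange_one_eq_nil (le_refl 0)]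
    | succ m hm ih =>
      intro hmn
      rw [PySem.List.pyRange_one_succ_right hm, List.foldl_append, ih (by omega)]
      simp only [List.foldl_cons, List.foldl_nil]
      have hlen : ((PySem.List.pyRange 0 (m + 1) 1).map (pvP a b)).length = (m + 1).toNat := by
        simp [PySem.List.length_pyRange_one]
      have hget : pvG ((PySem.List.pyRange 0 (m + 1) 1).map (pvP a b)
          ++ List.replicate (n - m).toNat 0) m = pvP a b m := by
        rw [pvG_append_left _ _ _ hm (by rw [hlen]; omega)]
        exact PySem.List.pyGetD_map_pyRange_of_nonneg _ _ _ _ hm (by omega)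
      rw [hget]
      have hz : List.replicate (n - m).toNat (0:Int)
          = 0 :: List.replicate (n - (m + 1)).toNat 0 := by
        have : (n - m).toNat = (n - (m + 1)).toNat + 1 := by omega
        rw [this, List.replicate_succ]
      rw [hz, show (m + 1 : Int) = (((m + 1).toNat : Nat) : Int) by omega,
          PySem.List.pySetD_natCast]
      have hset := pv_set_append ((PySem.List.pyRange 0 (m + 1) 1).map (pvP a b))
        (List.replicate (n - (m + 1)).toNat (0:Int)) 0 (pvP a b m + pvG a m * pvG b m)
      rw [hlen] at hset
      rw [show (((m + 1).toNat : Nat) : Int) = m + 1 from by omega, hset]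
      rw [PySem.List.pyRange_one_succ_right (by omega : (0:Int) ≤ m + 1), List.map_append]
      simp [pvP_succ a b m hm]
  have := key n hn (le_refl n)
  rw [show (n - n).toNat = 0 by omega] at this
  simpa using this

lemma psB_eq (a b : List Int) (n : Int) (hn : 0 ≤ n) :
    (PySem.List.pyRange 0 n 1).foldl
      (fun ps i => ps ++ [pvG ps (-1) + pvG a i * pvG b i]) [0] = psL a b n := by
  unfold psL
  have key : ∀ m : Int, 0 ≤ m → m ≤ n →
      (PySem.List.pyRange 0 m 1).foldl
        (fun ps i => ps ++ [pvG ps (-1) + pvG a i * pvG b i]) [0]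
      = (PySem.List.pyRange 0 (m + 1) 1).map (pvP a b) := by
    intro m hm
    induction m, hm using Int.le_induction with
    | base =>
      intro _
      rw [PySem.List.pyRange_one_eq_nil (le_refl 0), PySem.List.pyRange_one_singleton]
      simp [pvP, PySem.List.pyRange_one_eq_nil (le_refl 0)]
    | succ m hm ih =>
      intro hmn
      rw [PySem.List.pyRange_one_succ_right hm, List.foldl_append,
          ih (by omega)]
      simp only [List.foldl_cons, List.foldl_nil]
      rw [PySem.List.pyRange_one_succ_right (by omega : (0:Int) ≤ m), List.map_append]
      unfold pvG
      simp only [List.map_singleton]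
      rw [PySem.List.pyGetD_neg_one_append_singleton]
      rw [PySem.List.pyRange_one_succ_right (by omega : (0:Int) ≤ m + 1), List.map_append]
      simp only [List.map_singleton, pvP_succ a b m hm]
      rw [PySem.List.pyRange_one_succ_right (by omega : (0:Int) ≤ m), List.map_append]
      simp [pvG]
  exact key n hn (le_refl n)

-- generic facts about max-accumulating folds
lemma foldl_mono_of_step {α : Type} (step : Int → α → Int) (L : List α)
    (h : ∀ s x, x ∈ L → s ≤ step s x) (s : Int) : s ≤ L.foldl step s := by
  induction L generalizing s with
  | nil => simp
  | cons y t ih =>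
    exact le_trans (h s y (by simp)) (ih (fun s x hx => h s x (by simp [hx])) _)

lemma foldl_reaches {α : Type} (step : Int → α → Int) (L : List α)
    (hmono : ∀ s x, x ∈ L → s ≤ step s x)
    (x : α) (hx : x ∈ L) (v : Int) (hv : ∀ s, v ≤ step s x) (s : Int) :
    v ≤ L.foldl step s := by
  induction L generalizing s with
  | nil => cases hx
  | cons y t ih =>
    rcases List.mem_cons.mp hx with h | h
    · subst h
      exact le_trans (hv s)
        (foldl_mono_of_step _ _ (fun s x hx => hmono s x (by simp [hx])) _)
    · exact ih (fun s x hx => hmono s x (by simp [hx])) h _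

lemma foldl_val {α : Type} (step : Int → α → Int) (Val : Int → Prop) (L : List α)
    (h : ∀ s x, x ∈ L → (step s x = s ∨ Val (step s x))) (s : Int) :
    L.foldl step s = s ∨ Val (L.foldl step s) := by
  induction L generalizing s with
  | nil => exact Or.inl rfl
  | cons y t ih =>
    rcases ih (fun s x hx => h s x (by simp [hx])) (step s y) with h2 | h2
    · rw [List.foldl_cons, h2]; exact h s y (by simp)
    · exact Or.inr h2

lemma foldl_le_of_step {α : Type} (step : Int → α → Int) (L : List α) (t : Int)
    (h : ∀ s x, x ∈ L → s ≤ t → step s x ≤ t) : ∀ s, s ≤ t → L.foldl step s ≤ t := by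
  induction L with
  | nil => intro s hs; simpa using hs
  | cons y t' ih =>
    intro s hs
    exact ih (fun s x hx => h s x (by simp [hx])) _ (h s y (by simp) hs)

-- value shape shared by both sides
def pvVal (a b : List Int) (n v : Int) : Prop :=
  ∃ l r, 0 ≤ l ∧ l < r ∧ r < n ∧ v = pvF a b n l r

-- spec of A's while loop
lemma whileA_spec (a b : List Int) (n : Int) :
    ∀ (k : Nat) (l r mid best : Int), (n - r).toNat ≤ k → -1 ≤ l → l < r →
    mid = pvRev a b (l + 1) (r - 1) →
    best ≤ solveWhileA a b (psL a b n) n l r mid best ∧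
    (∀ d : Int, 0 ≤ d → 0 ≤ l - d → r + d < n →
        pvF a b n (l - d) (r + d) ≤ solveWhileA a b (psL a b n) n l r mid best) ∧
    (solveWhileA a b (psL a b n) n l r mid best = best ∨
      pvVal a b n (solveWhileA a b (psL a b n) n l r mid best)) := by
  intro k
  induction k with
  | zero =>
    intro l r mid best hk hl hlr hmid
    have hg : ¬ (0 ≤ l ∧ r < n) := by omega
    rw [solveWhileA, dif_neg hg]
    refine ⟨le_refl _, ?_, Or.inl rfl⟩
    intro d hd hld hrd
    exact absurd ⟨by omega, by omega⟩ hg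
  | succ k ih =>
    intro l r mid best hk hl hlr hmid
    rw [solveWhileA]
    by_cases hg : 0 ≤ l ∧ r < n
    · rw [dif_pos hg]
      dsimp only
      have hm' : mid + pvG a l * pvG b r + pvG a r * pvG b l
          = pvRev a b ((l - 1) + 1) ((r + 1) - 1) := by
        rw [show l - 1 + 1 = l from by ring, show r + 1 - 1 = r from by ring,
            pvRev_step a b l r hlr, hmid]
      have hb' : max best (pvG (psL a b n) l
            + (mid + pvG a l * pvG b r + pvG a r * pvG b l)
            + pvG (psL a b n) (-1) - pvG (psL a b n) (r + 1))
          = max best (pvF a b n l r) := by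
        rw [psL_get a b n l hg.1 (by omega), psL_last a b n (by omega),
            psL_get a b n (r + 1) (by omega) (by omega)]
        unfold pvF
        rw [hmid, ← pvRev_step a b l r hlr]
      rw [hb']
      obtain ⟨iha, ihb, ihc⟩ := ih (l - 1) (r + 1) _ (max best (pvF a b n l r))
        (by omega) (by omega) (by omega) hm'
      refine ⟨le_trans (le_max_left _ _) iha, ?_, ?_⟩
      · intro d hd hld hrd
        by_cases hd0 : d = 0
        · subst hd0
          have := le_trans (le_max_right best (pvF a b n l r)) iha
          simpa using this
        · have h2 := ihb (d - 1) (by omega) (by omega) (by omega)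
          rw [show l - 1 - (d - 1) = l - d from by ring,
              show r + 1 + (d - 1) = r + d from by ring] at h2
          exact h2
      · rcases ihc with h | h
        · rw [h]
          rcases max_choice best (pvF a b n l r) with h2 | h2 <;> rw [h2]
          · exact Or.inl rfl
          · exact Or.inr ⟨l, r, hg.1, hlr, hg.2, rfl⟩
        · exact Or.inr h
    · rw [dif_neg hg]
      refine ⟨le_refl _, ?_, Or.inl rfl⟩
      intro d hd hld hrd
      exact absurd ⟨by omega, by omega⟩ hg

lemma iterA_spec (a b : List Int) (n i best : Int) (hi : 0 ≤ i) (_hin : i < n) :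
    best ≤ solveIterA a b (psL a b n) n best i ∧
    (∀ l r, 0 ≤ l → l < r → r < n → (l + r = 2 * i ∨ l + r = 2 * i + 1) →
        pvF a b n l r ≤ solveIterA a b (psL a b n) n best i) ∧
    (solveIterA a b (psL a b n) n best i = best ∨
      pvVal a b n (solveIterA a b (psL a b n) n best i)) := by
  unfold solveIterA
  obtain ⟨h1a, h1b, h1c⟩ := whileA_spec a b n (n - (i + 1)).toNat (i - 1) (i + 1)
    (pvG a i * pvG b i) best (le_refl _) (by omega) (by omega)
    (by rw [show i - 1 + 1 = i from by ring, show i + 1 - 1 = i from by ring,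
      pvRev_single])
  set W1 := solveWhileA a b (psL a b n) n (i - 1) (i + 1) (pvG a i * pvG b i) best with hW1
  obtain ⟨h2a, h2b, h2c⟩ := whileA_spec a b n (n - (i + 1)).toNat i (i + 1) 0 W1
    (le_refl _) (by omega) (by omega)
    (by rw [show i + 1 - 1 = i from by ring]
        exact (pvRev_empty a b (i + 1) i (by omega)).symm)
  refine ⟨le_trans h1a h2a, ?_, ?_⟩
  · intro l r hl hlr hrn hpar
    rcases hpar with hp | hp
    · have h := h1b (i - 1 - l) (by omega) (by omega) (by omega)
      rw [show i - 1 - (i - 1 - l) = l from by ring,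
          show i + 1 + (i - 1 - l) = 2 * i - l from by ring,
          show 2 * i - l = r from by omega] at h
      exact le_trans h h2a
    · have h := h2b (i - l) (by omega) (by omega) (by omega)
      rw [show i - (i - l) = l from by ring,
          show i + 1 + (i - l) = 2 * i + 1 - l from by ring,
          show 2 * i + 1 - l = r from by omega] at h
      exact h
  · rcases h2c with h | h
    · rw [h]; exact h1c
    · exact Or.inr h

-- characterisation of A's result
lemma solveA_props (a b : List Int) (n : Int) (hn : 0 ≤ n) :
    pvP a b n ≤ solve n a b ∧
    (∀ l r, 0 ≤ l → l < r → r < n → pvF a b n l r ≤ solve n a b) ∧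
    (solve n a b = pvP a b n ∨ pvVal a b n (solve n a b)) := by
  unfold solve
  dsimp only
  rw [psA_eq a b n hn, psL_last a b n hn]
  have hstep : ∀ (s x : Int), x ∈ PySem.List.pyRange 0 n 1 →
      s ≤ solveIterA a b (psL a b n) n s x := by
    intro s x hx
    obtain ⟨hx0, hxn⟩ := (PySem.List.mem_pyRange_one).mp hx
    exact (iterA_spec a b n x s hx0 hxn).1
  refine ⟨foldl_mono_of_step _ _ hstep _, ?_, ?_⟩
  · intro l r hl hlr hrn
    have hpar : ∃ i : Int, 0 ≤ i ∧ i < n ∧ (l + r = 2 * i ∨ l + r = 2 * i + 1) := by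
      rcases Int.even_or_odd (l + r) with ⟨i, hi⟩ | ⟨i, hi⟩
      · exact ⟨i, by omega, by omega, Or.inl (by omega)⟩
      · exact ⟨i, by omega, by omega, Or.inr (by omega)⟩
    obtain ⟨i, hi0, hin, hp⟩ := hpar
    refine foldl_reaches _ _ hstep i (PySem.List.mem_pyRange_one.mpr ⟨hi0, hin⟩)
      _ (fun s => (iterA_spec a b n i s hi0 hin).2.1 l r hl hlr hrn hp) _
  · exact foldl_val _ _ _ (fun s x hx =>
      (iterA_spec a b n x s ((PySem.List.mem_pyRange_one).mp hx).1
        ((PySem.List.mem_pyRange_one).mp hx).2).2.2) _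

lemma row0_eq (a b : List Int) (n : Int) (_hn : 0 ≤ n) :
    List.replicate (n + 1).toNat (0 : Int) = rowL a b n 0 := by
  unfold rowL
  rw [show n - 0 + 1 = n + 1 from by ring]
  symm
  apply List.eq_replicate_iff.mpr
  constructor
  · rw [List.length_map, PySem.List.length_pyRange_one]
    omega
  · intro v hv
    obtain ⟨l, _, rfl⟩ := List.mem_map.mp hv
    exact pvRev_empty a b l (l + 0 - 1) (by omega)

lemma row1_eq (a b : List Int) (n : Int) :
    (PySem.List.pyRange 0 n 1).map (fun l => pvG a l * pvG b l) = rowL a b n 1 := by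
  unfold rowL
  rw [show n - 1 + 1 = n from by ring]
  apply List.map_congr_left
  intro l _
  rw [show l + 1 - 1 = l from by ring, pvRev_single]

lemma rowG (a b : List Int) (n L l : Int) (h0 : 0 ≤ l) (h1 : l < n - L + 1) :
    pvG (rowL a b n L) l = pvRev a b l (l + L - 1) := by
  unfold rowL pvG
  exact PySem.List.pyGetD_map_pyRange_of_nonneg _ _ _ _ h0 (by omega)

lemma curRow (a b : List Int) (n len : Int) (h2 : 2 ≤ len) (_hln : len ≤ n) :
    (PySem.List.pyRange 0 (n - len + 1) 1).map
      (fun l => pvG (rowL a b n (len - 2)) (l + 1) + pvG a l * pvG b (l + len - 1)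
        + pvG a (l + len - 1) * pvG b l) = rowL a b n len := by
  conv_rhs => unfold rowL
  apply List.map_congr_left
  intro l hl
  obtain ⟨hl0, hl1⟩ := PySem.List.mem_pyRange_one.mp hl
  rw [rowG a b n (len - 2) (l + 1) (by omega) (by omega)]
  rw [pvRev_step a b l (l + len - 1) (by omega)]
  rw [show l + 1 + (len - 2) - 1 = l + len - 1 - 1 from by ring]

lemma candB (a b : List Int) (n len l : Int) (h2 : 2 ≤ len) (_hln : len ≤ n)
    (hl0 : 0 ≤ l) (hl1 : l < n - len + 1) :
    pvG (psL a b n) l + pvG (rowL a b n len) l + pvP a b n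
      - pvG (psL a b n) (l + len - 1 + 1) = pvF a b n l (l + len - 1) := by
  rw [psL_get a b n l hl0 (by omega),
      psL_get a b n (l + len - 1 + 1) (by omega) (by omega),
      rowG a b n len l hl0 hl1]
  unfold pvF
  ring

lemma innerB_spec (a b : List Int) (n len s : Int) (h2 : 2 ≤ len) (_hln : len ≤ n) :
    s ≤ (PySem.List.pyRange 0 (n - len + 1) 1).foldl
        (fun best l => max best (pvG (psL a b n) l + pvG (rowL a b n len) l
          + pvP a b n - pvG (psL a b n) (l + len - 1 + 1))) s ∧
    (∀ l r, 0 ≤ l → l < r → r < n → r - l + 1 = len →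
      pvF a b n l r ≤ (PySem.List.pyRange 0 (n - len + 1) 1).foldl
        (fun best l => max best (pvG (psL a b n) l + pvG (rowL a b n len) l
          + pvP a b n - pvG (psL a b n) (l + len - 1 + 1))) s) ∧
    ((PySem.List.pyRange 0 (n - len + 1) 1).foldl
        (fun best l => max best (pvG (psL a b n) l + pvG (rowL a b n len) l
          + pvP a b n - pvG (psL a b n) (l + len - 1 + 1))) s = s ∨
      pvVal a b n ((PySem.List.pyRange 0 (n - len + 1) 1).foldl
        (fun best l => max best (pvG (psL a b n) l + pvG (rowL a b n len) l
          + pvP a b n - pvG (psL a b n) (l + len - 1 + 1))) s)) := by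
  have hmono : ∀ (s l : Int), l ∈ PySem.List.pyRange 0 (n - len + 1) 1 →
      s ≤ max s (pvG (psL a b n) l + pvG (rowL a b n len) l
        + pvP a b n - pvG (psL a b n) (l + len - 1 + 1)) :=
    fun s l _ => le_max_left _ _
  refine ⟨foldl_mono_of_step _ _ hmono _, ?_, ?_⟩
  · intro l r hl0 hlr hrn hlen
    refine foldl_reaches _ _ hmono l
      (PySem.List.mem_pyRange_one.mpr ⟨hl0, by omega⟩) _ (fun s => ?_) _
    rw [candB a b n len l h2 _hln hl0 (by omega), show l + len - 1 = r from by omega]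
    exact le_max_right _ _
  · refine foldl_val _ _ _ (fun s l hl => ?_) _
    obtain ⟨hl0, hl1⟩ := PySem.List.mem_pyRange_one.mp hl
    rcases max_choice s (pvG (psL a b n) l + pvG (rowL a b n len) l
        + pvP a b n - pvG (psL a b n) (l + len - 1 + 1)) with h | h <;> rw [h]
    · exact Or.inl rfl
    · exact Or.inr ⟨l, l + len - 1, hl0, by omega, by omega,
        candB a b n len l h2 _hln hl0 hl1⟩

lemma best1_eq (a b : List Int) (n : Int) (_hn : 0 ≤ n) :
    (PySem.List.pyRange 0 n 1).foldl
      (fun best l => max best (pvG (psL a b n) l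
        + pvG ((PySem.List.pyRange 0 n 1).map (fun l => pvG a l * pvG b l)) l
        + pvP a b n - pvG (psL a b n) (l + 1))) (pvP a b n) = pvP a b n := by
  apply le_antisymm
  · apply foldl_le_of_step _ _ _ _ _ (le_refl _)
    intro s l hl hs
    obtain ⟨hl0, hl1⟩ := PySem.List.mem_pyRange_one.mp hl
    have hc : pvG (psL a b n) l
        + pvG ((PySem.List.pyRange 0 n 1).map (fun l => pvG a l * pvG b l)) l
        + pvP a b n - pvG (psL a b n) (l + 1) = pvP a b n := by
      rw [psL_get a b n l hl0 (by omega), psL_get a b n (l + 1) (by omega) (by omega)]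
      have : pvG ((PySem.List.pyRange 0 n 1).map (fun l => pvG a l * pvG b l)) l
          = pvG a l * pvG b l :=
        PySem.List.pyGetD_map_pyRange_of_nonneg _ _ _ _ hl0 hl1
      rw [this, pvP_succ a b l hl0]
      ring
    rw [hc]
    exact max_le hs (le_refl _)
  · exact foldl_mono_of_step _ _ (fun s l _ => le_max_left _ _) _

lemma outerB_spec (a b : List Int) (n s0 : Int) (_hn : 0 ≤ n) :
    ∀ m : Int, 2 ≤ m → m ≤ n + 1 →
    ((PySem.List.pyRange 2 m 1).foldl (solveStepB a b (psL a b n) n (pvP a b n))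
        (rowL a b n 0, rowL a b n 1, s0)).1 = rowL a b n (m - 2) ∧
    ((PySem.List.pyRange 2 m 1).foldl (solveStepB a b (psL a b n) n (pvP a b n))
        (rowL a b n 0, rowL a b n 1, s0)).2.1 = rowL a b n (m - 1) ∧
    s0 ≤ ((PySem.List.pyRange 2 m 1).foldl (solveStepB a b (psL a b n) n (pvP a b n))
        (rowL a b n 0, rowL a b n 1, s0)).2.2 ∧
    (∀ l r, 0 ≤ l → l < r → r < n → r - l + 1 < m →
      pvF a b n l r ≤ ((PySem.List.pyRange 2 m 1).foldl
        (solveStepB a b (psL a b n) n (pvP a b n)) (rowL a b n 0, rowL a b n 1, s0)).2.2) ∧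
    (((PySem.List.pyRange 2 m 1).foldl (solveStepB a b (psL a b n) n (pvP a b n))
        (rowL a b n 0, rowL a b n 1, s0)).2.2 = s0 ∨
      pvVal a b n (((PySem.List.pyRange 2 m 1).foldl
        (solveStepB a b (psL a b n) n (pvP a b n)) (rowL a b n 0, rowL a b n 1, s0)).2.2)) := by
  intro m hm
  induction m, hm using Int.le_induction with
  | base =>
    intro _
    rw [PySem.List.pyRange_one_eq_nil (le_refl 2)]
    refine ⟨by norm_num, by norm_num, le_refl _, ?_, Or.inl rfl⟩
    intro l r hl0 hlr hrn habs
    omega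
  | succ m hm ih =>
    intro hmn
    obtain ⟨ih1, ih2, ih3, ih4, ih5⟩ := ih (by omega)
    rw [PySem.List.pyRange_one_succ_right (by omega : (2:Int) ≤ m), List.foldl_append]
    set st := (PySem.List.pyRange 2 m 1).foldl (solveStepB a b (psL a b n) n (pvP a b n))
      (rowL a b n 0, rowL a b n 1, s0) with hst
    simp only [List.foldl_cons, List.foldl_nil]
    unfold solveStepB
    dsimp only
    rw [ih1, ih2, show m - 2 = m - 2 from rfl]
    have hcur : (PySem.List.pyRange 0 (n - m + 1) 1).map
        (fun l => pvG (rowL a b n (m - 2)) (l + 1) + pvG a l * pvG b (l + m - 1)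
          + pvG a (l + m - 1) * pvG b l) = rowL a b n m :=
      curRow a b n m hm (by omega)
    rw [hcur]
    obtain ⟨ia, ib, ic⟩ := innerB_spec a b n m st.2.2 hm (by omega)
    refine ⟨by rw [show m + 1 - 2 = m - 1 from by ring], by rw [show m + 1 - 1 = m from by ring], le_trans ih3 ia, ?_, ?_⟩
    · intro l r hl0 hlr hrn hlen
      by_cases hc : r - l + 1 < m
      · exact le_trans (ih4 l r hl0 hlr hrn hc) ia
      · exact ib l r hl0 hlr hrn (by omega)
    · rcases ic with h | h
      · rw [h]; exact ih5
      · exact Or.inr h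

-- characterisation of B's result
lemma solveB_props (a b : List Int) (n : Int) (hn : 0 ≤ n) :
    pvP a b n ≤ solve_alt n a b ∧
    (∀ l r, 0 ≤ l → l < r → r < n → pvF a b n l r ≤ solve_alt n a b) ∧
    (solve_alt n a b = pvP a b n ∨ pvVal a b n (solve_alt n a b)) := by
  unfold solve_alt
  dsimp only
  rw [psB_eq a b n hn, psL_get a b n n hn (le_refl n), best1_eq a b n hn,
      row0_eq a b n hn, row1_eq a b n]
  by_cases h1 : 1 ≤ n
  · obtain ⟨o1, o2, o3, o4, o5⟩ := outerB_spec a b n (pvP a b n) hn (n + 1)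
      (by omega) (le_refl _)
    exact ⟨o3, fun l r hl hlr hrn => o4 l r hl hlr hrn (by omega), o5⟩
  · have hn0 : n = 0 := by omega
    subst hn0
    rw [PySem.List.pyRange_one_eq_nil (by norm_num : (0:Int) + 1 ≤ 2)]
    refine ⟨le_refl _, ?_, Or.inl rfl⟩
    intro l r hl hlr hrn
    omega

lemma best_unique (a b : List Int) (n t v1 v2 : Int)
    (h1a : t ≤ v1) (h1b : ∀ l r, 0 ≤ l → l < r → r < n → pvF a b n l r ≤ v1)
    (h1c : v1 = t ∨ pvVal a b n v1)
    (h2a : t ≤ v2) (h2b : ∀ l r, 0 ≤ l → l < r → r < n → pvF a b n l r ≤ v2)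
    (h2c : v2 = t ∨ pvVal a b n v2) : v1 = v2 := by
  apply le_antisymm
  · rcases h1c with h | ⟨l, r, hl, hlr, hrn, hv⟩
    · exact h ▸ h2a
    · exact hv ▸ h2b l r hl hlr hrn
  · rcases h2c with h | ⟨l, r, hl, hlr, hrn, hv⟩
    · exact h ▸ h1a
    · exact hv ▸ h1b l r hl hlr hrn

-- ===== VERDICT (by name: the statement is the Claim_ definition above) =====
theorem solve_spec : Claim_equal_solve := by
  intro n a b _ hpre
  unfold Spec_solve
  obtain ⟨hn, -, -⟩ := hpre
  obtain ⟨ha1, ha2, ha3⟩ := solveA_props a b n hn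
  obtain ⟨hb1, hb2, hb3⟩ := solveB_props a b n hn
  exact best_unique a b n (pvP a b n) _ _ ha1 ha2 ha3 hb1 hb2 hb3
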